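-- pv_equiv track=rewrite | github.com/santileortiz/weaver | mkpy/utility.py | recommended_opt
-- ===== SOURCE A (Python) =====
-- def recommended_opt (s):
--     opt_lst = s.split(',')
--     res = None
--     for s in opt_lst:
--         if s.startswith('--'):
--             res = s
--     if res == None:
--         res = opt_lst[0]
--     return res
-- ===== SOURCE B (Python) =====
-- def recommended_opt(s):
--     # Search the raw string for the last token boundary that is followed by a
--     # '--' option (every non-first token starts right after a comma), then
--     # slice out that token; with no such boundary the answer is the first
--     # token (it covers both the match-at-start case and the no-match fallback).
--     i = s.rfind(',--')
--     tail = s if i == -1 else s[i + 1:]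
--     j = tail.find(',')
--     return tail if j == -1 else tail[:j]
-- ===== Notes on version B (the rewrite author's own statement) =====
-- stated objective: alternative
-- what changed: B never builds the token list: it searches the raw string with rfind(',--') for the last token boundary followed by '--' and slices out that token (or the first token as fallback), instead of A's split(',') plus a forward scan tracking the last match.
import Mathlib
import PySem

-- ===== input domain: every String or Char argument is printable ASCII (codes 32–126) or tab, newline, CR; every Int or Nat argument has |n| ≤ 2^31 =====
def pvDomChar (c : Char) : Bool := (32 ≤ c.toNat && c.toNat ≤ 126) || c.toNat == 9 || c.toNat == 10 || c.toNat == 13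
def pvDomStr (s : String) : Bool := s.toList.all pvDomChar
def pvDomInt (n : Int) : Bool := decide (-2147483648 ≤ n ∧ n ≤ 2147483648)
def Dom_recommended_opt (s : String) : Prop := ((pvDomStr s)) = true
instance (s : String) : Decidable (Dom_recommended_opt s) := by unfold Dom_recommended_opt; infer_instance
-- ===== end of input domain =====

-- B drops the token list entirely: it searches the raw string with rfind(',--') for the last
-- token boundary followed by '--' and slices out that token (fallback: the first token),
-- instead of A's split(',') plus a forward scan tracking the last match. Same return value.

-- ===== PORT A =====
def recommended_opt (s : String) : String :=
  let opt_lst := (PySem.Str.split? s ",").getD []  -- s.split(','): sep ≠ "" so split? is always some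
  let res := opt_lst.foldl
    (fun r o => if PySem.Str.startswith o "--" then some o else r) (none : Option String)
  match res with
  | some r => r
  | none => (PySem.List.pyGet? opt_lst (0 : Int)).getD ""  -- opt_lst[0]; split never returns [], total guard only

-- ===== PORT B =====
def recommended_opt_alt (s : String) : String :=
  let i := PySem.Str.rfind s ",--"
  let tail := if i = -1 then s else PySem.Str.slice s (some (i + 1)) none  -- s[i+1:]
  let j := PySem.Str.find tail ","
  if j = -1 then tail else PySem.Str.slice tail none (some j)  -- tail[:j]

-- ===== PRECONDITION & SPEC =====
def Spec_recommended_opt (s : String) (out : String) : Prop := out = recommended_opt_alt s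
instance (s : String) (out : String) : Decidable (Spec_recommended_opt s out) := by unfold Spec_recommended_opt; infer_instance

-- ===== CLAIM (what is proved, stated in full; the proofs are below) =====
def Claim_equal_recommended_opt : Prop := ∀ (s : String), Dom_recommended_opt s → Spec_recommended_opt s (recommended_opt s)

-- ===== LEMMAS AND PROOFS =====

-- Proof-side views of the two programs on `List Char`.

def ncm : Char → Bool := fun c => decide (c ≠ ',')

-- the token list `s.split(',')` at character level
def tokSplit : List Char → List (List Char)
  | [] => [[]]
  | c :: r => if c = ',' then [] :: tokSplit r
      else (c :: (tokSplit r).headI) :: (tokSplit r).tail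

def mtch : List Char → Bool := fun t => PySem.Chars.startswith t ['-', '-']

-- value computed by A: last matching token, else first token
def charA (L : List Char) : List Char :=
  ((tokSplit L).reverse.find? mtch).getD (L.takeWhile ncm)

-- B's first-token extraction (find ',' then slice)
def charTok (X : List Char) : List Char :=
  if PySem.Chars.find X [','] = -1 then X else X.take (PySem.Chars.find X [',']).toNat

-- value computed by B: rfind ',--', slice, first token of the slice
def charB (L : List Char) : List Char :=
  charTok (if PySem.Chars.rfind L [',', '-', '-'] = -1 then L
           else L.drop (PySem.Chars.rfind L [',', '-', '-'] + 1).toNat)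

theorem dropWhile_cons_head {α : Type} {p : α → Bool} :
    ∀ (l : List α) (c : α) (tl : List α), l.dropWhile p = c :: tl → p c = false := by
  intro l
  induction l with
  | nil => intro c tl h; simp [List.dropWhile] at h
  | cons x xs ih =>
    intro c tl h
    rw [List.dropWhile_cons] at h
    by_cases hx : p x
    · rw [if_pos hx] at h
      exact ih _ _ h
    · rw [if_neg hx] at h
      obtain ⟨rfl, -⟩ := List.cons.injEq .. ▸ h
      simpa using hx

-- ---- tokSplit facts ----

theorem tokSplit_ne_nil (l : List Char) : tokSplit l ≠ [] := by
  cases l with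
  | nil => simp [tokSplit]
  | cons c r => simp only [tokSplit]; split <;> simp

theorem headI_tokSplit (l : List Char) : (tokSplit l).headI = l.takeWhile ncm := by
  induction l with
  | nil => simp [tokSplit]
  | cons c r ih =>
    simp only [tokSplit, List.takeWhile_cons]
    by_cases h : c = ','
    · simp [h, ncm]
    · simp [h, ncm, ih]

theorem tokSplit_cons_comma (r : List Char) : tokSplit (',' :: r) = [] :: tokSplit r := by
  simp [tokSplit]

theorem tokSplit_append (t r : List Char) (ht : ∀ c ∈ t, c ≠ ',') :
    tokSplit (t ++ ',' :: r) = t :: tokSplit r := by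
  induction t with
  | nil => simp [tokSplit_cons_comma]
  | cons c t' ih =>
    have hc : c ≠ ',' := ht c (by simp)
    have ih' := ih (fun d hd => ht d (by simp [hd]))
    simp only [List.cons_append, tokSplit, hc, if_false, ih']
    simp

theorem tokSplit_nocomma (l : List Char) (h : ',' ∉ l) : tokSplit l = [l] := by
  induction l with
  | nil => simp [tokSplit]
  | cons c r ih =>
    have hc : c ≠ ',' := fun e => h (e ▸ List.mem_cons_self ..)
    have ih' := ih (fun m => h (List.mem_cons_of_mem _ m))
    simp [tokSplit, hc, ih']

-- ---- splitOn at sep = [','] computes tokSplit ----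

theorem splitOnGo_comma : ∀ (fuel : Nat) (l cur : List Char) (acc : List (List Char)),
    l.length < fuel →
    PySem.Chars.splitOn.go [','] fuel l cur acc
      = acc.reverse ++ ((cur.reverse ++ (tokSplit l).headI) :: (tokSplit l).tail) := by
  intro fuel
  induction fuel with
  | zero => intro l cur acc h; omega
  | succ f ih =>
    intro l cur acc h
    cases l with
    | nil =>
      rw [PySem.Chars.splitOn.go]
      simp [tokSplit]
      exact Nat.succ_ne_zero f
    | cons c rest =>
      rw [PySem.Chars.splitOn.go]
      by_cases hc : c = ','
      · subst hc
        simp only [List.isPrefixOf, BEq.rfl, Bool.true_and, if_true]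
        have hd1 : List.drop [','].length (',' :: rest) = rest := rfl
        rw [hd1, ih rest [] (cur.reverse :: acc) (by simpa using Nat.lt_of_succ_lt_succ h)]
        have hne := tokSplit_ne_nil rest
        obtain ⟨h0, ts, hts⟩ := List.exists_cons_of_ne_nil hne
        simp [tokSplit, hts]
      · have hpf : ([','].isPrefixOf (c :: rest)) = false := by
          simp [List.isPrefixOf]
          exact fun e => hc e.symm
        simp only [hpf, if_false]
        rw [ih rest (c :: cur) acc (by simpa using Nat.lt_of_succ_lt_succ h)]
        have hne := tokSplit_ne_nil rest
        obtain ⟨h0, ts, hts⟩ := List.exists_cons_of_ne_nil hne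
        simp [tokSplit, hc, hts]

theorem splitOn_comma (l : List Char) :
    PySem.Chars.splitOn l [','] = tokSplit l := by
  unfold PySem.Chars.splitOn
  rw [splitOnGo_comma (l.length + 1) l [] [] (by omega)]
  have hne := tokSplit_ne_nil l
  obtain ⟨h0, ts, hts⟩ := List.exists_cons_of_ne_nil hne
  simp [hts]

-- ---- fold over tokens = last match (find? on the reverse) ----

theorem foldl_lastMatch {α : Type} (m : α → Bool) (l : List α) (init : Option α) :
    l.foldl (fun r o => if m o then some o else r) init = (l.reverse.find? m).or init := by
  induction l generalizing init with
  | nil => simp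
  | cons a l ih =>
    simp only [List.foldl_cons, ih, List.reverse_cons, List.find?_append]
    cases h : l.reverse.find? m <;> by_cases hm : m a <;> simp_all [Option.or]

theorem foldl_opt_map {α β : Type} (m : α → Bool) (f : α → β) (l : List α) (init : Option α) :
    l.foldl (fun r o => if m o then some (f o) else r) (init.map f)
      = (l.foldl (fun r o => if m o then some o else r) init).map f := by
  induction l generalizing init with
  | nil => rfl
  | cons a l ih =>
    simp only [List.foldl_cons]
    by_cases hm : m a
    · simp only [hm, if_true]
      exact (Option.map_some .. ▸ ih (some a) :)
    · simp [hm, ih]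

-- ---- rfind characterization ----

theorem rfindGo_succ (s sub : List Char) (j : Nat) :
    PySem.Chars.rfind.go s sub (j + 1)
      = if sub.isPrefixOf (List.drop (j + 1) s) then ((j : Int) + 1) else PySem.Chars.rfind.go s sub j := by
  rw [PySem.Chars.rfind.go]; push_cast; rfl

theorem rfindGo_zero (s sub : List Char) :
    PySem.Chars.rfind.go s sub 0 = if sub.isPrefixOf s then 0 else -1 := by
  rw [PySem.Chars.rfind.go]

theorem rfindGo_neg_one_iff (s sub : List Char) (j : Nat) :
    PySem.Chars.rfind.go s sub j = -1 ↔ ∀ i ≤ j, ¬ sub <+: s.drop i := by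
  induction j with
  | zero =>
    rw [rfindGo_zero]
    constructor
    · intro h i hi
      have : i = 0 := by omega
      subst this
      intro hp
      rw [List.isPrefixOf_iff_prefix.2 (by simpa using hp)] at h
      simp at h
    · intro h
      have h0 := h 0 le_rfl
      simp only [List.drop_zero] at h0
      rw [if_neg (by simpa [List.isPrefixOf_iff_prefix] using h0)]
  | succ j ih =>
    rw [rfindGo_succ]
    constructor
    · intro h i hi
      by_cases hp : sub.isPrefixOf (List.drop (j + 1) s)
      · rw [if_pos hp] at h; omega
      · rw [if_neg hp] at h
        rcases Nat.lt_or_ge i (j + 1) with hlt | hge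
        · exact (ih.1 h) i (by omega)
        · have : i = j + 1 := by omega
          subst this
          simpa [List.isPrefixOf_iff_prefix] using hp
    · intro h
      have hp : ¬ sub.isPrefixOf (List.drop (j + 1) s) := by
        simpa [List.isPrefixOf_iff_prefix] using h (j + 1) le_rfl
      rw [if_neg hp]
      exact ih.2 (fun i hi => h i (by omega))

theorem rfindGo_spec (s sub : List Char) (j : Nat) (h : PySem.Chars.rfind.go s sub j ≠ -1) :
    ∃ k : Nat, k ≤ j ∧ PySem.Chars.rfind.go s sub j = (k : Int) ∧ sub <+: s.drop k ∧
      ∀ i : Nat, k < i → i ≤ j → ¬ sub <+: s.drop i := by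
  induction j with
  | zero =>
    rw [rfindGo_zero] at h ⊢
    by_cases hp : sub.isPrefixOf s
    · exact ⟨0, le_rfl, by simp [hp], by simpa using List.isPrefixOf_iff_prefix.1 hp, by omega⟩
    · simp [hp] at h
  | succ j ih =>
    rw [rfindGo_succ] at h ⊢
    by_cases hp : sub.isPrefixOf (List.drop (j + 1) s)
    · refine ⟨j + 1, le_rfl, by simp [hp], List.isPrefixOf_iff_prefix.1 hp, by omega⟩
    · rw [if_neg hp] at h ⊢
      obtain ⟨k, hk, he, hpre, hmax⟩ := ih h
      refine ⟨k, by omega, he, hpre, ?_⟩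
      intro i hki hij
      rcases Nat.lt_or_ge i (j + 1) with hlt | hge
      · exact hmax i hki (by omega)
      · have : i = j + 1 := by omega
        subst this
        simpa [List.isPrefixOf_iff_prefix] using hp

theorem rfind_neg_one_iff (s sub : List Char) (hsub : sub ≠ []) :
    PySem.Chars.rfind s sub = -1 ↔ ∀ i : Nat, ¬ sub <+: s.drop i := by
  unfold PySem.Chars.rfind
  rw [rfindGo_neg_one_iff]
  constructor
  · intro h i
    rcases Nat.le_total i s.length with hle | hge
    · exact h i hle
    · rw [List.drop_eq_nil_of_le hge]
      intro hp
      exact hsub (List.prefix_nil.1 hp)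
  · intro h i _
    exact h i

theorem rfind_spec (s sub : List Char) (hsub : sub ≠ []) (h : PySem.Chars.rfind s sub ≠ -1) :
    ∃ k : Nat, PySem.Chars.rfind s sub = (k : Int) ∧ sub <+: s.drop k ∧
      ∀ i : Nat, k < i → ¬ sub <+: s.drop i := by
  unfold PySem.Chars.rfind at h ⊢
  obtain ⟨k, hk, he, hpre, hmax⟩ := rfindGo_spec s sub s.length h
  refine ⟨k, he, hpre, ?_⟩
  intro i hki
  rcases Nat.le_total i s.length with hle | hge
  · exact hmax i hki hle
  · rw [List.drop_eq_nil_of_le hge]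
    intro hp
    exact hsub (List.prefix_nil.1 hp)

theorem rfind_eq_of (s sub : List Char) (hsub : sub ≠ []) (k : Nat)
    (hocc : sub <+: s.drop k) (hmax : ∀ i : Nat, k < i → ¬ sub <+: s.drop i) :
    PySem.Chars.rfind s sub = (k : Int) := by
  have hne : PySem.Chars.rfind s sub ≠ -1 := by
    intro hEq
    exact ((rfind_neg_one_iff s sub hsub).1 hEq k) hocc
  obtain ⟨k', he, hpre, hmax'⟩ := rfind_spec s sub hsub hne
  have hkk : k' = k := by
    rcases Nat.lt_trichotomy k' k with h | h | h
    · exact absurd hocc (hmax' k h)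
    · exact h
    · exact absurd hpre (hmax k' h)
  rw [he, hkk]

-- ---- occurrences of ",--" in t ++ ',' :: r (t comma-free) ----

theorem occ_iff (t r : List Char) (ht : ∀ c ∈ t, c ≠ ',') (i : Nat) :
    [',', '-', '-'] <+: (t ++ ',' :: r).drop i ↔
      (i = t.length ∧ ['-', '-'] <+: r) ∨ (∃ j : Nat, i = t.length + 1 + j ∧ [',', '-', '-'] <+: r.drop j) := by
  rcases Nat.lt_trichotomy i t.length with hlt | heq | hgt
  · constructor
    · intro hp
      exfalso
      rw [List.drop_append_of_le_length (by omega)] at hp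
      rw [List.drop_eq_getElem_cons hlt] at hp
      obtain ⟨e, -⟩ := (List.cons_prefix_cons).1 hp
      exact ht _ (List.getElem_mem hlt) e.symm
    · rintro (⟨he, -⟩ | ⟨j, he, -⟩) <;> omega
  · subst heq
    rw [List.drop_left]
    constructor
    · intro hp
      exact Or.inl ⟨rfl, ((List.cons_prefix_cons).1 hp).2⟩
    · rintro (⟨-, hp⟩ | ⟨j, he, -⟩)
      · exact (List.cons_prefix_cons).2 ⟨rfl, hp⟩
      · omega
  · have hdrop : (t ++ ',' :: r).drop i = r.drop (i - t.length - 1) := by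
      have h1 : i = t.length + ((i - t.length - 1) + 1) := by omega
      conv_lhs => rw [h1]
      rw [List.drop_length_add_append, List.drop_succ_cons]
    rw [hdrop]
    constructor
    · intro hp
      exact Or.inr ⟨i - t.length - 1, by omega, hp⟩
    · rintro (⟨he, -⟩ | ⟨j, he, hp⟩)
      · omega
      · have : i - t.length - 1 = j := by omega
        rw [this]; exact hp

theorem rfind_append (t r : List Char) (ht : ∀ c ∈ t, c ≠ ',') :
    PySem.Chars.rfind (t ++ ',' :: r) [',', '-', '-']
      = if PySem.Chars.rfind r [',', '-', '-'] = -1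
        then (if ['-', '-'].isPrefixOf r then (t.length : Int) else -1)
        else ((t.length : Int) + 1 + PySem.Chars.rfind r [',', '-', '-']) := by
  by_cases hr : PySem.Chars.rfind r [',', '-', '-'] = -1
  · rw [if_pos hr]
    have hnone : ∀ j : Nat, ¬ [',', '-', '-'] <+: r.drop j := (rfind_neg_one_iff r _ (by simp)).1 hr
    by_cases hd : ['-', '-'].isPrefixOf r
    · rw [if_pos hd]
      apply rfind_eq_of _ _ (by simp)
      · rw [occ_iff t r ht]
        exact Or.inl ⟨rfl, List.isPrefixOf_iff_prefix.1 hd⟩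
      · intro i hi hp
        rcases (occ_iff t r ht i).1 hp with ⟨he, -⟩ | ⟨j, -, hp'⟩
        · omega
        · exact hnone j hp'
    · rw [if_neg hd]
      rw [rfind_neg_one_iff _ _ (by simp)]
      intro i hp
      rcases (occ_iff t r ht i).1 hp with ⟨-, hp'⟩ | ⟨j, -, hp'⟩
      · exact hd (List.isPrefixOf_iff_prefix.2 hp')
      · exact hnone j hp'
  · rw [if_neg hr]
    obtain ⟨k, he, hpre, hmax⟩ := rfind_spec r _ (by simp) hr
    rw [he]
    have hcast : (t.length : Int) + 1 + (k : Int) = ((t.length + 1 + k : Nat) : Int) := by push_cast; ring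
    rw [hcast]
    apply rfind_eq_of _ _ (by simp)
    · rw [occ_iff t r ht]
      exact Or.inr ⟨k, rfl, hpre⟩
    · intro i hi hp
      rcases (occ_iff t r ht i).1 hp with ⟨he', -⟩ | ⟨j, he', hp'⟩
      · omega
      · exact hmax j (by omega) hp'

-- ---- takeWhile / first-token facts ----

theorem takeWhile_all (l : List Char) (h : ',' ∉ l) : l.takeWhile ncm = l := by
  rw [List.takeWhile_eq_self_iff]
  intro c hc
  simp only [ncm, decide_eq_true_eq]
  exact fun e => h (e ▸ hc)

theorem takeWhile_append_comma (t r : List Char) (ht : ∀ c ∈ t, c ≠ ',') :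
    (t ++ ',' :: r).takeWhile ncm = t := by
  induction t with
  | nil => simp [List.takeWhile_cons, ncm]
  | cons c t' ih =>
    have hc : c ≠ ',' := ht c (by simp)
    simp only [List.cons_append, List.takeWhile_cons]
    simp [ncm, hc, ih (fun d hd => ht d (by simp [hd]))]

theorem dd_prefix_takeWhile_iff (r : List Char) :
    ['-', '-'] <+: r.takeWhile ncm ↔ ['-', '-'] <+: r := by
  constructor
  · intro h
    exact h.trans (List.takeWhile_prefix ncm)
  · intro h
    obtain ⟨r', rfl⟩ := h
    simp [List.takeWhile_cons, ncm, List.cons_prefix_cons]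

theorem mtch_takeWhile_iff (r : List Char) :
    mtch (r.takeWhile ncm) = true ↔ ['-', '-'] <+: r := by
  rw [mtch, PySem.Chars.startswith_iff, dd_prefix_takeWhile_iff]

theorem take_eq_takeWhile (X : List Char) (k : Nat) (hk : k < X.length) (hc : X[k] = ',')
    (hlt : ∀ i : Nat, (h : i < k) → X[i]'(by omega) ≠ ',') :
    X.take k = X.takeWhile ncm := by
  induction X generalizing k with
  | nil => simp at hk
  | cons x xs ih =>
    cases k with
    | zero =>
      simp only [List.getElem_cons_zero] at hc
      simp [List.takeWhile_cons, ncm, hc]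
    | succ k' =>
      have hx : x ≠ ',' := by
        have := hlt 0 (by omega)
        simpa using this
      have hncm : ncm x = true := by simp [ncm, hx]
      simp only [List.take_succ_cons, List.takeWhile_cons, hncm, if_true]
      rw [ih k' (by simpa using hk) (by simpa using hc)
        (fun i h => by simpa using hlt (i + 1) (by omega))]

theorem singleton_prefix_drop_iff (X : List Char) (i : Nat) (hi : i < X.length) :
    [','] <+: X.drop i ↔ X[i] = ',' := by
  rw [List.drop_eq_getElem_cons hi]
  constructor
  · intro h
    exact ((List.cons_prefix_cons).1 h).1.symm
  · intro h
    exact (List.cons_prefix_cons).2 ⟨h.symm, List.nil_prefix⟩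

-- B's first-token extraction computes takeWhile ncm
theorem charTok_eq (X : List Char) : charTok X = X.takeWhile ncm := by
  unfold charTok
  by_cases h : PySem.Chars.find X [','] = -1
  · rw [if_pos h, takeWhile_all]
    intro hm
    exact ((PySem.Chars.find_eq_neg_one_iff X [',']).1 h) ((List.singleton_infix_iff ',' X).2 hm)
  · rw [if_neg h]
    have h0 : 0 ≤ PySem.Chars.find X [','] := by
      have := PySem.Chars.neg_one_le_find (s := X) (sub := [','])
      omega
    obtain ⟨hpre, hmin⟩ := PySem.Chars.find_spec (s := X) (sub := [',']) h0
    set k := (PySem.Chars.find X [',']).toNat with hk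
    have hklen : k < X.length := by
      by_contra hge
      rw [List.drop_eq_nil_of_le (by omega)] at hpre
      have := List.prefix_nil.1 hpre
      simp at this
    apply take_eq_takeWhile X k hklen ((singleton_prefix_drop_iff X k hklen).1 hpre)
    intro i hik hcomma
    exact hmin i hik ((singleton_prefix_drop_iff X i (by omega)).2 hcomma)

-- ---- the main induction: charB = charA, with the rfind/token bridge carried along ----

theorem main_ind : ∀ (n : Nat) (L : List Char), L.length ≤ n →
    charB L = charA L ∧
      (PySem.Chars.rfind L [',', '-', '-'] = -1 ↔
        ∀ tok ∈ (tokSplit L).tail, ¬ ['-', '-'] <+: tok) := by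
  intro n
  induction n with
  | zero =>
    intro L hL
    have : L = [] := List.length_eq_zero_iff.1 (by omega)
    subst this
    refine ⟨rfl, ?_, ?_⟩
    · intro _ tok htok
      simp [tokSplit] at htok
    · intro _
      rw [rfind_neg_one_iff _ _ (by simp)]
      intro i hp
      simp at hp
  | succ n ih =>
    intro L hL
    by_cases hmem : ',' ∈ L
    · -- split at the first comma: L = t0 ++ ',' :: r, t0 comma-free
      obtain ⟨t0, r, hL', ht⟩ : ∃ t0 r, L = t0 ++ ',' :: r ∧ ∀ c ∈ t0, c ≠ ',' := by
        have hdw : L.dropWhile ncm ≠ [] := by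
          intro he
          have htd := List.takeWhile_append_dropWhile (p := ncm) (l := L)
          rw [he, List.append_nil] at htd
          have hm2 : ',' ∈ L.takeWhile ncm := by rw [htd]; exact hmem
          have := List.mem_takeWhile_imp hm2
          simp [ncm] at this
        obtain ⟨c, tl, hct⟩ := List.exists_cons_of_ne_nil hdw
        have hc : c = ',' := by
          have hh := dropWhile_cons_head L c tl hct
          simp only [ncm] at hh
          simpa using hh
        refine ⟨L.takeWhile ncm, tl, ?_, ?_⟩
        · conv_lhs => rw [← List.takeWhile_append_dropWhile (p := ncm) (l := L)]
          rw [hct, hc]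
        · intro c' hc'
          have := List.mem_takeWhile_imp hc'
          simpa [ncm] using this
      subst hL'
      have hrlen : r.length ≤ n := by
        simp only [List.length_append, List.length_cons] at hL
        omega
      obtain ⟨ihB, ihT⟩ := ih r hrlen
      obtain ⟨h0, ts, hts⟩ := List.exists_cons_of_ne_nil (tokSplit_ne_nil r)
      have hh0 : h0 = r.takeWhile ncm := by
        have := headI_tokSplit r
        rw [hts] at this
        simpa using this
      have hA : charA (t0 ++ ',' :: r)
          = (((tokSplit r).reverse.find? mtch).or ([t0].find? mtch)).getD t0 := by
        unfold charA
        rw [tokSplit_append t0 r ht, takeWhile_append_comma t0 r ht,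
          List.reverse_cons, List.find?_append]
      have htail : (tokSplit (t0 ++ ',' :: r)).tail = tokSplit r := by
        rw [tokSplit_append t0 r ht, List.tail_cons]
      constructor
      · -- charB = charA
        by_cases hr : PySem.Chars.rfind r [',', '-', '-'] = -1
        · by_cases hd : ['-', '-'].isPrefixOf r
          · -- (b) last match is the first token of r
            have hrfL : PySem.Chars.rfind (t0 ++ ',' :: r) [',', '-', '-'] = (t0.length : Int) := by
              rw [rfind_append t0 r ht, if_pos hr, if_pos hd]
            have hBL : charB (t0 ++ ',' :: r) = r.takeWhile ncm := by
              unfold charB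
              rw [hrfL, if_neg (by omega : ¬((t0.length : Int) = -1))]
              have harg : ((t0.length : Int) + 1).toNat = t0.length + 1 := by omega
              rw [harg]
              have hdrop : (t0 ++ ',' :: r).drop (t0.length + 1) = r := by
                rw [List.drop_length_add_append, List.drop_succ_cons, List.drop_zero]
              rw [hdrop, charTok_eq]
            have hnone : ts.reverse.find? mtch = none := by
              apply List.find?_eq_none.2
              intro x hx
              have hx1 : x ∈ (tokSplit r).tail := by rw [hts]; simpa using (List.mem_reverse.1 hx)
              have := ihT.1 hr x hx1
              rw [mtch, PySem.Chars.startswith_iff] at *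
              simpa using this
            have hh0m : mtch h0 = true := by
              rw [hh0]
              exact (mtch_takeWhile_iff r).2 (List.isPrefixOf_iff_prefix.1 hd)
            rw [hBL, hA, hts, List.reverse_cons, List.find?_append, hnone,
              List.find?_cons_of_pos hh0m]
            simp [Option.or, hh0]
          · -- (c) no match at all: fall back to the first token t0
            have hrfL : PySem.Chars.rfind (t0 ++ ',' :: r) [',', '-', '-'] = -1 := by
              rw [rfind_append t0 r ht, if_pos hr, if_neg hd]
            have hBL : charB (t0 ++ ',' :: r) = t0 := by
              unfold charB
              rw [hrfL, if_pos rfl, charTok_eq, takeWhile_append_comma t0 r ht]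
            have hnone : ts.reverse.find? mtch = none := by
              apply List.find?_eq_none.2
              intro x hx
              have hx1 : x ∈ (tokSplit r).tail := by rw [hts]; simpa using (List.mem_reverse.1 hx)
              have := ihT.1 hr x hx1
              rw [mtch, PySem.Chars.startswith_iff] at *
              simpa using this
            have hh0f : ¬ (mtch h0 = true) := by
              rw [hh0, mtch_takeWhile_iff]
              intro hdd
              exact hd (List.isPrefixOf_iff_prefix.2 hdd)
            rw [hBL, hA, hts, List.reverse_cons, List.find?_append, hnone,
              List.find?_cons_of_neg hh0f]
            cases hft : [t0].find? mtch with
            | none => simp [Option.or]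
            | some w =>
              have hw : w = t0 := by
                have := List.mem_of_find?_eq_some hft
                simpa using this
              simp [Option.or, hw]
        · -- (a) a match occurs strictly inside r: both sides recurse to r
          obtain ⟨k, he, hpre, hmax⟩ := rfind_spec r _ (by simp) hr
          have hBL : charB (t0 ++ ',' :: r) = charTok (r.drop (k + 1)) := by
            unfold charB
            rw [rfind_append t0 r ht, if_neg hr, he,
              if_neg (by omega : ¬((t0.length : Int) + 1 + (k : Int) = -1))]
            have harg : ((t0.length : Int) + 1 + (k : Int) + 1).toNat = t0.length + (k + 2) := by omega
            rw [harg, List.drop_length_add_append]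
            have hdrop : (',' :: r).drop (k + 2) = r.drop (k + 1) := by
              have : k + 2 = (k + 1) + 1 := by omega
              rw [this, List.drop_succ_cons]
            rw [hdrop]
          have hBr : charB r = charTok (r.drop (k + 1)) := by
            unfold charB
            rw [he, if_neg (by omega : ¬((k : Int) = -1))]
            have harg : ((k : Int) + 1).toNat = k + 1 := by omega
            rw [harg]
          have hsome : ∃ v, (tokSplit r).reverse.find? mtch = some v := by
            cases hfm : (tokSplit r).reverse.find? mtch with
            | some v => exact ⟨v, rfl⟩
            | none =>
              exfalso
              have hall := List.find?_eq_none.1 hfm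
              apply hr
              apply ihT.2
              intro tok htok hdd
              have : tok ∈ (tokSplit r).reverse := List.mem_reverse.2 (List.mem_of_mem_tail htok)
              have := hall tok this
              rw [mtch, PySem.Chars.startswith_iff] at this
              exact this hdd
          obtain ⟨v, hv⟩ := hsome
          have hAr : charA r = v := by
            unfold charA
            rw [hv]
            rfl
          rw [hBL, ← hBr, ihB, hAr, hA, hv]
          rfl
      · -- the rfind/token bridge for L = t0 ++ ',' :: r
        rw [htail, rfind_append t0 r ht]
        constructor
        · intro h
          by_cases hr : PySem.Chars.rfind r [',', '-', '-'] = -1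
          · rw [if_pos hr] at h
            by_cases hd : ['-', '-'].isPrefixOf r
            · rw [if_pos hd] at h
              exfalso; omega
            · intro tok htok
              rw [hts] at htok
              rcases List.mem_cons.1 htok with h1 | h1
              · subst h1
                intro hdd
                rw [hh0] at hdd
                have : ['-', '-'] <+: r := (dd_prefix_takeWhile_iff r).1 hdd
                exact hd (List.isPrefixOf_iff_prefix.2 this)
              · exact ihT.1 hr tok (by rw [hts]; simpa using h1)
          · rw [if_neg hr] at h
            obtain ⟨k, he, -, -⟩ := rfind_spec r _ (by simp) hr
            rw [he] at h
            exfalso; omega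
        · intro hall
          have hall' : ∀ tok ∈ tokSplit r, ¬ ['-', '-'] <+: tok := by
            intro tok htok
            exact hall tok htok
          have hr : PySem.Chars.rfind r [',', '-', '-'] = -1 :=
            ihT.2 (fun tok htok => hall' tok (List.mem_of_mem_tail htok))
          rw [if_pos hr]
          have hd : ¬ ['-', '-'].isPrefixOf r := by
            intro hd
            have hdd : ['-', '-'] <+: r.takeWhile ncm :=
              (dd_prefix_takeWhile_iff r).2 (List.isPrefixOf_iff_prefix.1 hd)
            exact hall' h0 (hts ▸ List.mem_cons_self ..) (hh0 ▸ hdd)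
          rw [if_neg hd]
    · -- no comma: single token, no occurrence of ",--"
      have htok : tokSplit L = [L] := tokSplit_nocomma L hmem
      have hrf : PySem.Chars.rfind L [',', '-', '-'] = -1 := by
        rw [rfind_neg_one_iff _ _ (by simp)]
        intro i hp
        obtain ⟨u, hu⟩ := hp
        have : ',' ∈ L.drop i := by rw [← hu]; simp
        exact hmem (List.mem_of_mem_drop this)
      constructor
      · unfold charB
        rw [hrf, if_pos rfl, charTok_eq, takeWhile_all L hmem]
        unfold charA
        rw [htok, takeWhile_all L hmem]
        cases hfm : ([L] : List (List Char)).reverse.find? mtch with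
        | none => simp [hfm]
        | some v =>
          have hv : v = L := by
            have := List.mem_of_find?_eq_some hfm
            simpa using this
          simp [hfm, hv]
      · rw [htok]
        simp [hrf]

-- ---- reduction of the ports to charA / charB ----

theorem portA_eq (s : String) : recommended_opt s = String.ofList (charA s.toList) := by
  have hsep : ("," : String).toList = [','] := rfl
  have hdd : ("--" : String).toList = ['-', '-'] := rfl
  have hsplit : PySem.Str.split? s "," = some ((tokSplit s.toList).map String.ofList) := by
    unfold PySem.Str.split? PySem.Chars.split?
    rw [hsep]
    simp [splitOn_comma]
  simp only [recommended_opt]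
  rw [hsplit]
  simp only [Option.getD_some]
  rw [List.foldl_map]
  have hsw : (fun (x : Option String) (y : List Char) =>
      if PySem.Str.startswith (String.ofList y) "--" then some (String.ofList y) else x)
      = (fun x y => if mtch y then some (String.ofList y) else x) := by
    funext x y
    rw [PySem.Str.startswith_eq, String.toList_ofList, hdd]
    rfl
  rw [hsw]
  rw [show (none : Option String) = Option.map String.ofList (none : Option (List Char)) from rfl]
  rw [foldl_opt_map, foldl_lastMatch]
  cases hfm : (tokSplit s.toList).reverse.find? mtch with
  | some v =>
    simp [charA, hfm, Option.or]
  | none =>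
    obtain ⟨h0, ts, hts⟩ := List.exists_cons_of_ne_nil (tokSplit_ne_nil s.toList)
    have htw : s.toList.takeWhile ncm = h0 := by
      have := headI_tokSplit s.toList
      rw [hts] at this
      simpa using this.symm
    have hAv : charA s.toList = h0 := by
      unfold charA
      rw [hfm, Option.getD_none, htw]
    rw [hAv, hts, List.map_cons]
    rw [show (0 : Int) = ((0 : Nat) : Int) from by norm_num, PySem.List.pyGet?_natCast]
    simp

theorem strTok_eq (x : String) :
    (if PySem.Str.find x "," = -1 then x
     else PySem.Str.slice x none (some (PySem.Str.find x ","))) = String.ofList (charTok x.toList) := by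
  have hsep : ("," : String).toList = [','] := rfl
  rw [PySem.Str.find_eq, hsep]
  unfold charTok
  by_cases hj : PySem.Chars.find x.toList [','] = -1
  · rw [if_pos hj, if_pos hj, String.ofList_toList]
  · rw [if_neg hj, if_neg hj]
    have h0 : 0 ≤ PySem.Chars.find x.toList [','] := by
      have := PySem.Chars.neg_one_le_find (s := x.toList) (sub := [','])
      omega
    refine (String.ofList_toList).symm.trans (congrArg String.ofList ?_)
    rw [PySem.Str.toList_slice]
    simp only [PySem.Chars.slice_eq_listSlice]
    exact PySem.List.slice_to _ h0

theorem portB_eq (s : String) : recommended_opt_alt s = String.ofList (charB s.toList) := by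
  have hpat : (",--" : String).toList = [',', '-', '-'] := rfl
  simp only [recommended_opt_alt]
  rw [PySem.Str.rfind_eq, hpat]
  unfold charB
  by_cases hi : PySem.Chars.rfind s.toList [',', '-', '-'] = -1
  · rw [if_pos hi, if_pos hi]
    exact strTok_eq s
  · rw [if_neg hi, if_neg hi]
    have h0 : 0 ≤ PySem.Chars.rfind s.toList [',', '-', '-'] := by
      obtain ⟨k, he, -, -⟩ := rfind_spec s.toList _ (by simp) hi
      rw [he]
      exact Int.natCast_nonneg k
    have htl : (PySem.Str.slice s (some (PySem.Chars.rfind s.toList [',', '-', '-'] + 1)) none).toList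
        = s.toList.drop (PySem.Chars.rfind s.toList [',', '-', '-'] + 1).toNat := by
      rw [PySem.Str.toList_slice]
      simp only [PySem.Chars.slice_eq_listSlice]
      exact PySem.List.slice_from _ (by omega)
    have hst := strTok_eq (PySem.Str.slice s (some (PySem.Chars.rfind s.toList [',', '-', '-'] + 1)) none)
    rw [htl] at hst
    exact hst

-- ===== VERDICT (by name: the statement is the Claim_ definition above) =====
theorem recommended_opt_spec : Claim_equal_recommended_opt := by
  intro s _
  unfold Spec_recommended_opt
  rw [portA_eq, portB_eq, (main_ind s.toList.length s.toList le_rfl).1]
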